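-- pv_equiv track=rewrite | github.com/plusyou13/py_tools | acwing/python版本/拼接最大数.py | maxNumber2
-- ===== SOURCE A (Python) =====
-- from typing import List
--
-- def maxNumber2(nums1: List[int], nums2: List[int], k: int) -> List[int]:
--
--     max_str = []
--
--     def pick_max(nums: List[int], k: int) -> List[int]:
--         size = len(nums)
--         drop = size - k  # 防止删除后长度《k
--         stk = []
--         for num in nums:
--             while drop and stk and stk[-1] < num:
--                 stk.pop()
--                 drop -= 1
--             stk.append(num)
--
--         return stk[:k]
--
--     def merge_list(a1: List[int], a2: List[int]) -> List[int]:
--         res = []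
--         while a1 or a2:
--             big = a1 if a1 > a2 else a2  # 直接可以根据字典序比较大小，由于每一次都会pop，所以每一次循环都要判断
--             res.append(big[0])
--             big.pop(0)
--         return res
--
--     for i in range(k + 1):  # i作为长度，从1-len才有意义，所以+1
--         if i <= len(nums1) and k - i <= len(nums2):
--             max_str = max(merge_list(pick_max(nums1, i), pick_max(nums2, k - i)), max_str)  # 每一次都选字典序最大的。
--     return max_str
-- ===== SOURCE B (Python) =====
-- from typing import List
--
-- def maxNumber2(nums1: List[int], nums2: List[int], k: int) -> List[int]:
--
--     def pick(nums: List[int], m: int) -> List[int]: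
--         # greedy window selection: leftmost maximum of the feasible window, then recurse
--         if m == 0:
--             return []
--         window = nums[:len(nums) - m + 1]
--         mx = max(window)
--         j = window.index(mx)
--         return [mx] + pick(nums[j + 1:], m - 1)
--
--     def merge(a1: List[int], a2: List[int]) -> List[int]:
--         # two-pointer lexicographic merge, no mutation
--         i = j = 0
--         res = []
--         while i < len(a1) or j < len(a2):
--             if a1[i:] > a2[j:]:
--                 res.append(a1[i])
--                 i += 1
--             else:
--                 res.append(a2[j])
--                 j += 1
--         return res
--
--     best = []
--     for i in range(k + 1):
--         if i <= len(nums1) and k - i <= len(nums2):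
--             best = max(merge(pick(nums1, i), pick(nums2, k - i)), best)
--     return best
-- ===== Notes on version B (the rewrite author's own statement) =====
-- stated objective: alternative
-- what changed: pick_max's monotonic stack with a drop budget is replaced by recursive greedy window selection (leftmost maximum of nums[:len-m+1], then recurse on the suffix), and merge_list's mutating pop(0) loop by a two-index-pointer merge over immutable lists.
import Mathlib
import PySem

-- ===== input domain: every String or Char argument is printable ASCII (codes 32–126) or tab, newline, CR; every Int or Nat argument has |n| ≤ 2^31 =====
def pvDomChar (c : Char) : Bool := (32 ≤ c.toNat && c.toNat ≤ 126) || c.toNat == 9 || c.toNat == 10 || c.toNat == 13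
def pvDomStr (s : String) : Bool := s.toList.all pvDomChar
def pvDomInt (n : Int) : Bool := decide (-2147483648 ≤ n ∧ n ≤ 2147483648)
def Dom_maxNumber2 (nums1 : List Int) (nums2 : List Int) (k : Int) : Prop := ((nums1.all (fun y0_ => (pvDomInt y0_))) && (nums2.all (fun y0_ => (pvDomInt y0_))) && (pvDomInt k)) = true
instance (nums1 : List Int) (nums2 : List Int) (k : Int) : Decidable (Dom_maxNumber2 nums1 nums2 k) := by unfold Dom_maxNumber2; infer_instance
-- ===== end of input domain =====

-- B replaces A's monotonic-stack subsequence pick by greedy window selection and A's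
-- pop-from-front merge by an index-pointer merge (alternative algorithm, same values).

-- ===== PORT A =====
-- Python '>' on two int lists (lexicographic), shared by both ports.
def pvListGt : List Int → List Int → Bool
  | _ :: _, [] => true
  | [], _ => false
  | a :: as, b :: bs => if b < a then true else if a < b then false else pvListGt as bs

-- Python max(x, y) on int lists: returns y only when y > x.
def pvPyMax (x y : List Int) : List Int := if pvListGt y x then y else x

theorem pvListGt_ne_nil (a b : List Int) (h : pvListGt a b = true) : a ≠ [] := by
  cases a <;> cases b <;> simp [pvListGt] at h ⊢

theorem pvListGt_nil_of (a : List Int) (h : pvListGt a [] = false) : a = [] := by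
  cases a <;> simp [pvListGt] at h ⊢

-- the inner 'while drop and stk and stk[-1] < num: stk.pop(); drop -= 1' loop;
-- stack kept top-first (Python appends and pops at the right end)
def pvPopLoop : List Int → Int → Int → List Int × Int
  | [], d, _ => ([], d)
  | t :: r, d, num => if d ≠ 0 ∧ t < num then pvPopLoop r (d - 1) num else (t :: r, d)

def pvStepA (st : List Int × Int) (num : Int) : List Int × Int :=
  let p := pvPopLoop st.1 st.2 num
  (num :: p.1, p.2)

-- pick_max of A: monotonic stack with a drop budget, then stk[:k]
def pvPickMax (nums : List Int) (k : Int) : List Int :=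
  let st := nums.foldl pvStepA ([], (nums.length : Int) - k)
  PySem.List.slice st.1.reverse none (some k)

-- merge_list of A: repeatedly pop the front of the lexicographically bigger list
def pvMergeList (a1 a2 : List Int) : List Int :=
  if h : a1 ≠ [] ∨ a2 ≠ [] then
    if hg : pvListGt a1 a2 then (a1.headD 0) :: pvMergeList a1.tail a2
    else (a2.headD 0) :: pvMergeList a1 a2.tail
  else []
termination_by a1.length + a2.length
decreasing_by
  · have ha := pvListGt_ne_nil a1 a2 hg
    cases a1 with
    | nil => exact absurd rfl ha
    | cons x xs => simp
  · have hb : a2 ≠ [] := by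
      intro hnil
      subst hnil
      rcases h with h1 | h1
      · exact h1 (pvListGt_nil_of a1 (by simpa using hg))
      · exact h1 rfl
    cases a2 with
    | nil => exact absurd rfl hb
    | cons x xs => simp

def maxNumber2 (nums1 : List Int) (nums2 : List Int) (k : Int) : List Int :=
  (PySem.List.pyRange 0 (k + 1) 1).foldl
    (fun max_str i =>
      if i ≤ (nums1.length : Int) ∧ k - i ≤ (nums2.length : Int) then
        pvPyMax (pvMergeList (pvPickMax nums1 i) (pvPickMax nums2 (k - i))) max_str
      else max_str) []

-- ===== PORT B =====
-- pick of B: greedy window selection — leftmost maximum of nums[:len-m+1], then recurse on the tail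
def pvPick (nums : List Int) (m : Int) : List Int :=
  if m = 0 then []
  else
    match nums with
    | [] => []  -- unreachable on the calls made (Python's max would raise on the empty window)
    | a :: l =>
      let window := PySem.List.slice (a :: l) none (some (((a :: l).length : Int) - m + 1))
      let mx := (PySem.List.max? window (fun x => x)).getD 0   -- max(window); window nonempty on the calls made
      let j := (PySem.List.index? window mx).getD 0            -- window.index(mx), defined since mx ∈ window
      mx :: pvPick (PySem.List.slice (a :: l) (some ((j : Int) + 1)) none) (m - 1)
termination_by nums.length
decreasing_by
  rw [PySem.List.slice_from _ (by positivity)]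
  simp

-- merge of B: two index pointers into immutable lists; a1[i:] / a2[j:] with i,j ≥ 0 are exactly List.drop
def pvMerge (a1 a2 : List Int) (i j : Nat) : List Int :=
  if h : i < a1.length ∨ j < a2.length then
    if hg : pvListGt (a1.drop i) (a2.drop j) then
      a1.getD i 0 :: pvMerge a1 a2 (i + 1) j   -- a1[i] with i < len a1: exactly getD
    else
      a2.getD j 0 :: pvMerge a1 a2 i (j + 1)
  else []
termination_by (a1.length - i) + (a2.length - j)
decreasing_by
  · have : i < a1.length := by
      have := pvListGt_ne_nil _ _ hg
      by_contra hc
      exact this (List.drop_eq_nil_iff.mpr (by omega))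
    omega
  · have : j < a2.length := by
      by_contra hc
      have hdj : a2.drop j = [] := List.drop_eq_nil_iff.mpr (by omega)
      have := pvListGt_nil_of (a1.drop i) (by simpa [hdj] using hg)
      have : a1.length ≤ i := List.drop_eq_nil_iff.mp this
      rcases h with h1 | h1 <;> omega
    omega

def maxNumber2_alt (nums1 : List Int) (nums2 : List Int) (k : Int) : List Int :=
  (PySem.List.pyRange 0 (k + 1) 1).foldl
    (fun best i =>
      if i ≤ (nums1.length : Int) ∧ k - i ≤ (nums2.length : Int) then
        pvPyMax (pvMerge (pvPick nums1 i) (pvPick nums2 (k - i)) 0 0) best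
      else best) []

-- ===== PRECONDITION & SPEC =====
def Spec_maxNumber2 (nums1 : List Int) (nums2 : List Int) (k : Int) (out : List Int) : Prop := out = maxNumber2_alt nums1 nums2 k
instance (nums1 : List Int) (nums2 : List Int) (k : Int) (out : List Int) : Decidable (Spec_maxNumber2 nums1 nums2 k out) := by unfold Spec_maxNumber2; infer_instance

-- ===== CLAIM (what is proved, stated in full; the proofs are below) =====
def Claim_equal_maxNumber2 : Prop := ∀ (nums1 : List Int) (nums2 : List Int) (k : Int), Dom_maxNumber2 nums1 nums2 k → Spec_maxNumber2 nums1 nums2 k (maxNumber2 nums1 nums2 k)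

-- ===== LEMMAS AND PROOFS =====

-- popLoop bookkeeping: budget minus stack length is preserved, elements come from the stack,
-- and a nonnegative budget stays nonnegative
theorem pvPopLoop_inv (s : List Int) (d y : Int) :
    (pvPopLoop s d y).2 - ((pvPopLoop s d y).1.length : Int) = d - s.length ∧
    (∀ x ∈ (pvPopLoop s d y).1, x ∈ s) ∧
    (0 ≤ d → 0 ≤ (pvPopLoop s d y).2) := by
  induction s generalizing d with
  | nil => simp [pvPopLoop]
  | cons t r ih =>
    by_cases hc : d ≠ 0 ∧ t < y
    · obtain ⟨h1, h2, h3⟩ := ih (d - 1)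
      rw [pvPopLoop, if_pos hc]
      refine ⟨by simp only [List.length_cons] at h1 ⊢; push_cast at h1 ⊢; omega, fun x hx => List.mem_cons_of_mem _ (h2 x hx), fun hd => h3 (by omega)⟩
    · rw [pvPopLoop, if_neg hc]
      exact ⟨rfl, fun x hx => hx, fun hd => hd⟩

-- a stack entirely below y, with enough budget, is cleared completely
theorem pvPopLoop_clear (s : List Int) (d y : Int)
    (hlt : ∀ x ∈ s, x < y) (hd : (s.length : Int) ≤ d) :
    pvPopLoop s d y = ([], d - s.length) := by
  induction s generalizing d with
  | nil => simp [pvPopLoop]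
  | cons t r ih =>
    have hlen : ((t :: r).length : Int) = r.length + 1 := by simp
    rw [pvPopLoop, if_pos ⟨by omega, hlt t (by simp)⟩,
      ih (d - 1) (fun x hx => hlt x (List.mem_cons_of_mem _ hx)) (by omega)]
    simp only [hlen]
    ring_nf

-- popping through s ++ [M] factors through popping s
theorem pvPopLoop_append (s : List Int) (M : Int) (d y : Int) :
    pvPopLoop (s ++ [M]) d y =
      if (pvPopLoop s d y).1 = [] then pvPopLoop [M] (pvPopLoop s d y).2 y
      else ((pvPopLoop s d y).1 ++ [M], (pvPopLoop s d y).2) := by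
  induction s generalizing d with
  | nil => simp [pvPopLoop]
  | cons t r ih =>
    by_cases hc : d ≠ 0 ∧ t < y
    · rw [List.cons_append, pvPopLoop, if_pos hc, pvPopLoop, if_pos hc, ih (d - 1)]
    · rw [List.cons_append, pvPopLoop, if_neg hc, pvPopLoop, if_neg hc]
      simp

-- running the stack loop keeps 'budget - length' deterministic and all elements small
theorem pvRun (M : Int) (xs : List Int) :
    ∀ (s : List Int) (d : Int), (∀ x ∈ s, x < M) → (∀ x ∈ xs, x < M) →
    ∃ s', xs.foldl pvStepA (s, d) = (s', d - ((s.length : Int) + xs.length - s'.length)) ∧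
      (∀ x ∈ s', x < M) := by
  induction xs with
  | nil => exact fun s d hs _ => ⟨s, by simp, hs⟩
  | cons y t ih =>
    intro s d hs hxs
    obtain ⟨hinv, hmem, -⟩ := pvPopLoop_inv s d y
    obtain ⟨s', he, hs'⟩ := ih (y :: (pvPopLoop s d y).1) (pvPopLoop s d y).2
      (by
        intro x hx
        rcases List.mem_cons.mp hx with rfl | hx
        · exact hxs x (by simp)
        · exact hs x (hmem x hx))
      (fun x hx => hxs x (List.mem_cons_of_mem _ hx))
    refine ⟨s', ?_, hs'⟩
    rw [List.foldl_cons]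
    have hstep : pvStepA (s, d) y = (y :: (pvPopLoop s d y).1, (pvPopLoop s d y).2) := rfl
    rw [hstep, he]
    refine Prod.ext rfl ?_
    simp only [List.length_cons] at *
    push_cast at *
    omega

theorem pvTakeStep (x y : Int) (t : List Int) (c : Int)
    (hx : x ∈ t.take (c - 1).toNat) : x ∈ (y :: t).take c.toNat := by
  by_cases hc : 1 ≤ c
  · have h : c.toNat = (c - 1).toNat + 1 := by omega
    rw [h, List.take_succ_cons]
    exact List.mem_cons_of_mem _ hx
  · have h : (c - 1).toNat = 0 := by omega
    rw [h] at hx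
    simp at hx

-- a bottom element M that dominates the reachable window is never popped
theorem pvProtect (M : Int) (ys : List Int) :
    ∀ (s : List Int) (d : Int), 0 ≤ d →
    (∀ x ∈ ys.take (d - (s.length : Int)).toNat, x ≤ M) →
    ys.foldl pvStepA (s ++ [M], d) =
      ((ys.foldl pvStepA (s, d)).1 ++ [M], (ys.foldl pvStepA (s, d)).2) := by
  induction ys with
  | nil => intro s d _ _; rfl
  | cons y t ih =>
    intro s d hd htake
    obtain ⟨hinv, hmem, hpos⟩ := pvPopLoop_inv s d y
    have hd2 : 0 ≤ (pvPopLoop s d y).2 := hpos hd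
    have hstepR : pvStepA (s, d) y = (y :: (pvPopLoop s d y).1, (pvPopLoop s d y).2) := rfl
    by_cases hnil : (pvPopLoop s d y).1 = []
    · -- the stack above M is exhausted; M survives: a budget > 0 would point inside the window
      have hd2eq : (pvPopLoop s d y).2 = d - s.length := by
        rw [hnil] at hinv; simpa using hinv
      have hblock : ¬((pvPopLoop s d y).2 ≠ 0 ∧ M < y) := by
        rintro ⟨hne, hlt⟩
        have h1 : 1 ≤ d - (s.length : Int) := by omega
        have hy : y ∈ (y :: t).take (d - (s.length : Int)).toNat := by
          have : (d - (s.length : Int)).toNat = (d - (s.length : Int) - 1).toNat + 1 := by omega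
          rw [this, List.take_succ_cons]; simp
        exact absurd (htake y hy) (by omega)
      have hq : pvPopLoop (s ++ [M]) d y = ([M], (pvPopLoop s d y).2) := by
        rw [pvPopLoop_append, if_pos hnil, pvPopLoop, if_neg hblock]
      have hstepL : pvStepA (s ++ [M], d) y = ([y] ++ [M], (pvPopLoop s d y).2) := by
        simp [pvStepA, hq]
      rw [List.foldl_cons, List.foldl_cons, hstepL, hstepR, hnil,
        ih [y] (pvPopLoop s d y).2 hd2 ?_]
      intro x hx
      refine htake x (pvTakeStep x y t _ ?_)
      have : ((pvPopLoop s d y).2 - (([y] : List Int).length : Int)).toNat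
          = (d - (s.length : Int) - 1).toNat := by simp; omega
      rw [this] at hx
      exact hx
    · have hq : pvPopLoop (s ++ [M]) d y
          = ((pvPopLoop s d y).1 ++ [M], (pvPopLoop s d y).2) := by
        rw [pvPopLoop_append, if_neg hnil]
      have hstepL : pvStepA (s ++ [M], d) y
          = ((y :: (pvPopLoop s d y).1) ++ [M], (pvPopLoop s d y).2) := by
        simp [pvStepA, hq]
      rw [List.foldl_cons, List.foldl_cons, hstepL, hstepR,
        ih (y :: (pvPopLoop s d y).1) (pvPopLoop s d y).2 hd2 ?_]
      intro x hx
      refine htake x (pvTakeStep x y t _ ?_)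
      have : ((pvPopLoop s d y).2 - (((y :: (pvPopLoop s d y).1) : List Int).length : Int)).toNat
          = (d - (s.length : Int) - 1).toNat := by
        simp only [List.length_cons]; push_cast at hinv ⊢; omega
      rw [this] at hx
      exact hx

-- processing a prefix xs ++ [M] with all of xs below M and enough budget leaves exactly [M]
theorem pvPrefix (M : Int) (xs : List Int) (d : Int)
    (hxs : ∀ x ∈ xs, x < M) (hd : (xs.length : Int) ≤ d) :
    (xs ++ [M]).foldl pvStepA ([], d) = ([M], d - xs.length) := by
  obtain ⟨s', he, hs'⟩ := pvRun M xs [] d (by simp) hxs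
  rw [List.foldl_append, he]
  simp only [List.foldl_cons, List.foldl_nil]
  rw [show ∀ (st : List Int × Int) (y : Int),
      pvStepA st y = (y :: (pvPopLoop st.1 st.2 y).1, (pvPopLoop st.1 st.2 y).2)
      from fun _ _ => rfl]
  rw [pvPopLoop_clear s' _ M hs' (by simp only [List.length_nil]; push_cast; omega)]
  refine Prod.ext rfl ?_
  simp only [List.length_nil]
  push_cast
  omega

-- the greedy decomposition of the monotonic-stack pick
theorem pvPickMax_cons (xs rest : List Int) (M : Int) (m : Int)
    (hm : 1 ≤ m) (hm2 : m - 1 ≤ (rest.length : Int))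
    (hxs : ∀ x ∈ xs, x < M)
    (hwin : ∀ x ∈ rest.take (((rest.length : Int) - (m - 1)).toNat), x ≤ M) :
    pvPickMax (xs ++ M :: rest) m = M :: pvPickMax rest (m - 1) := by
  unfold pvPickMax
  rw [show xs ++ M :: rest = (xs ++ [M]) ++ rest from by simp, List.foldl_append,
    pvPrefix M xs _ hxs (by simp; omega)]
  have e : (((xs ++ [M]) ++ rest).length : Int) - m - xs.length
      = (rest.length : Int) - (m - 1) := by simp; ring
  rw [e, show ([M] : List Int) = [] ++ [M] from rfl,
    pvProtect M rest [] ((rest.length : Int) - (m - 1)) (by omega) (by simpa using hwin)]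
  rw [PySem.List.slice_to _ (by omega : (0:Int) ≤ m), PySem.List.slice_to _ (by omega : (0:Int) ≤ m - 1)]
  simp only [List.reverse_append, List.reverse_cons, List.reverse_nil, List.nil_append,
    List.singleton_append]
  have hmt : m.toNat = (m - 1).toNat + 1 := by omega
  rw [hmt, List.take_succ_cons]

-- the two subsequence picks agree on the meaningful domain 0 ≤ m ≤ len
theorem pvPick_eq (nums : List Int) (m : Int) (h0 : 0 ≤ m) (h1 : m ≤ (nums.length : Int)) :
    pvPickMax nums m = pvPick nums m := by
  induction hN : m.toNat using Nat.strong_induction_on generalizing nums m with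
  | _ N ih =>
  by_cases hm0 : m = 0
  · subst hm0
    unfold pvPickMax pvPick
    rw [PySem.List.slice_to _ le_rfl]
    simp
  · cases nums with
    | nil => simp at h1; omega
    | cons a l =>
      have hm1 : 1 ≤ m := by omega
      -- the window nums[:len-m+1], its maximum M and the index j of its first occurrence
      set W := PySem.List.slice (a :: l) none (some (((a :: l).length : Int) - m + 1)) with hWdef
      have hW : W = (a :: l).take ((((a :: l).length : Int) - m + 1).toNat) :=
        PySem.List.slice_to _ (by omega)
      have hwt : ((((a :: l).length : Int) - m + 1)).toNat = (a :: l).length - m.toNat + 1 := by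
        omega
      have hWlen : W.length = (a :: l).length - m.toNat + 1 := by
        rw [hW, List.length_take, hwt]
        omega
      have hWne : W ≠ [] := by
        intro hc
        have := congrArg List.length hc
        rw [hWlen] at this
        simp at this
      cases hMx : PySem.List.max? W (fun x => x) with
      | none => exact absurd ((PySem.List.max?_eq_none_iff _ _).mp hMx) hWne
      | some M =>
      have hmax : ∀ y ∈ W, y ≤ M := by
        intro y hy
        exact PySem.List.max?_isMax hMx y hy
      cases hJx : PySem.List.index? W M with
      | none => exact absurd (PySem.List.max?_mem hMx) ((PySem.List.index?_eq_none_iff _ _).mp hJx)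
      | some j =>
      obtain ⟨hj, hWj, hfirst⟩ := PySem.List.getElem_of_index?_eq_some hJx
      have hjn : j < (a :: l).length := by omega
      have helem : (a :: l)[j] = M := by
        simp only [hW, List.getElem_take] at hWj
        exact hWj
      have hsplit : a :: l = (a :: l).take j ++ M :: (a :: l).drop (j + 1) := by
        conv_lhs => rw [← List.take_append_drop j (a :: l)]
        rw [List.drop_eq_getElem_cons hjn, helem]
      have hreslen : ((a :: l).drop (j + 1)).length = (a :: l).length - (j + 1) :=
        List.length_drop ..
      have hxs : ∀ x ∈ (a :: l).take j, x < M := by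
        intro x hx
        obtain ⟨i, hi, rfl⟩ := List.mem_iff_getElem.mp hx
        have hij : i < j := by
          have := hi
          simp [List.length_take] at this
          omega
        rw [List.getElem_take]
        have hiW : i < W.length := by omega
        have hWi : W[i] = (a :: l)[i] := by
          simp only [hW, List.getElem_take]
        have h1 := hmax W[i] (List.getElem_mem hiW)
        have h2 := hfirst i hij
        rw [hWi] at h1 h2
        omega
      have hwin : ∀ x ∈ ((a :: l).drop (j + 1)).take
          (((((a :: l).drop (j + 1)).length : Int) - (m - 1)).toNat), x ≤ M := by
        intro x hx
        have hq : (((((a :: l).drop (j + 1)).length : Int) - (m - 1)).toNat)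
            = ((((a :: l).length : Int) - m + 1).toNat) - (j + 1) := by
          rw [hreslen]
          omega
        rw [hq] at hx
        have : ((a :: l).drop (j + 1)).take (((((a :: l).length : Int) - m + 1).toNat) - (j + 1))
            = W.drop (j + 1) := by
          rw [hW, List.drop_take]
        rw [this] at hx
        exact hmax x (List.mem_of_mem_drop hx)
      -- A's side: the stack pick of A follows the greedy decomposition
      have hA : pvPickMax (a :: l) m = M :: pvPickMax ((a :: l).drop (j + 1)) (m - 1) := by
        conv_lhs => rw [hsplit]
        exact pvPickMax_cons _ _ M m hm1 (by rw [hreslen]; omega) hxs hwin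
      -- B's side: one unfolding of the greedy pick
      have hB : pvPick (a :: l) m = M :: pvPick ((a :: l).drop (j + 1)) (m - 1) := by
        rw [pvPick, if_neg hm0]
        simp only [← hWdef, hMx, hJx, Option.getD_some]
        rw [PySem.List.slice_from _ (by positivity)]
        congr 1
      rw [hA, hB]
      congr 1
      exact ih (m - 1).toNat (by omega) _ (m - 1) (by omega) (by rw [hreslen]; omega) rfl

-- the pointer merge is the pop-from-front merge of the remaining suffixes
theorem pvHeadD_drop (l : List Int) (i : Nat) : (l.drop i).headD 0 = l.getD i 0 := by
  rw [List.headD_eq_head?_getD, List.head?_drop, List.getD_eq_getElem?_getD]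

theorem pvMerge_eq_drop_aux (n : Nat) : ∀ (a1 a2 : List Int) (i j : Nat),
    (a1.length - i) + (a2.length - j) ≤ n →
    pvMerge a1 a2 i j = pvMergeList (a1.drop i) (a2.drop j) := by
  induction n with
  | zero =>
    intro a1 a2 i j hn
    rw [pvMerge, dif_neg (by omega), pvMergeList, dif_neg (by
      simp only [ne_eq, not_or, not_not]
      exact ⟨List.drop_eq_nil_of_le (by omega), List.drop_eq_nil_of_le (by omega)⟩)]
  | succ n ih =>
    intro a1 a2 i j hn
    by_cases h : i < a1.length ∨ j < a2.length
    · have h' : a1.drop i ≠ [] ∨ a2.drop j ≠ [] := by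
        rcases h with h | h
        · exact Or.inl (by simp [List.drop_eq_nil_iff]; omega)
        · exact Or.inr (by simp [List.drop_eq_nil_iff]; omega)
      rw [pvMerge, dif_pos h, pvMergeList, dif_pos h']
      by_cases hg : pvListGt (a1.drop i) (a2.drop j) = true
      · have hi : i < a1.length := by
          have := pvListGt_ne_nil _ _ hg
          by_contra hc
          exact this (List.drop_eq_nil_of_le (by omega))
        rw [dif_pos hg, dif_pos hg, pvHeadD_drop, List.tail_drop, ih a1 a2 (i + 1) j (by omega)]
      · have hj : j < a2.length := by
          by_contra hc
          have hdj : a2.drop j = [] := List.drop_eq_nil_of_le (by omega)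
          have := pvListGt_nil_of (a1.drop i) (by simpa [hdj] using hg)
          have := List.drop_eq_nil_iff.mp this
          rcases h with h | h <;> omega
        rw [dif_neg hg, dif_neg hg, pvHeadD_drop, List.tail_drop, ih a1 a2 i (j + 1) (by omega)]
    · rw [pvMerge, dif_neg h, pvMergeList, dif_neg (by
        simp only [ne_eq, not_or, not_not]
        exact ⟨List.drop_eq_nil_of_le (by omega), List.drop_eq_nil_of_le (by omega)⟩)]

theorem pvMerge_eq_drop (a1 a2 : List Int) (i j : Nat) :
    pvMerge a1 a2 i j = pvMergeList (a1.drop i) (a2.drop j) :=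
  pvMerge_eq_drop_aux ((a1.length - i) + (a2.length - j)) a1 a2 i j le_rfl

-- ===== VERDICT (by name: the statement is the Claim_ definition above) =====
theorem maxNumber2_spec : Claim_equal_maxNumber2 := by
  intro nums1 nums2 k _
  unfold Spec_maxNumber2 maxNumber2 maxNumber2_alt
  apply PySem.List.foldl_congr_mem
  intro acc i hi
  have hmem := (PySem.List.mem_pyRange_one).mp hi
  split_ifs with hg
  · rw [pvMerge_eq_drop, List.drop_zero, List.drop_zero,
      pvPick_eq nums1 i (by omega) (by exact_mod_cast hg.1),
      pvPick_eq nums2 (k - i) (by omega) (by omega)]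
  · rfl
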